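-- pv_equiv track=rewrite | github.com/olDox0/olDox222_RN | engine/tools/local_index/_text_utils.py | _truncate_lines
-- ===== SOURCE A (Python) =====
-- def _truncate_lines(lines: list[str], max_chars: int) -> list[str]:
--     out: list[str] = []
--     total = 0
--     in_block = False
--     for ln in lines:
--         if "[CODE-BEGIN" in ln or "[MATH-BEGIN" in ln:
--             in_block = True
--         elif "[CODE-END]" in ln or "[MATH-END]" in ln:
--             in_block = False
--         out.append(ln)
--         total += len(ln) + 1
--         if total > max_chars and not in_block:
--             out.append("...")
--             break
--     return out
-- ===== SOURCE B (Python) =====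
-- def _truncate_lines(lines: list[str], max_chars: int) -> list[str]:
--     # pass 1: block state after processing each line
--     states = []
--     in_block = False
--     for ln in lines:
--         if "[CODE-BEGIN" in ln or "[MATH-BEGIN" in ln:
--             in_block = True
--         elif "[CODE-END]" in ln or "[MATH-END]" in ln:
--             in_block = False
--         states.append(in_block)
--     # pass 2: cumulative character totals (each line counts len + 1)
--     totals = []
--     t = 0
--     for ln in lines:
--         t += len(ln) + 1
--         totals.append(t)
--     # pass 3: first index over budget and outside a block -> cut there
--     for i, (t, s) in enumerate(zip(totals, states)):
--         if t > max_chars and not s: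
--             return lines[:i + 1] + ["..."]
--     return list(lines)
-- ===== Notes on version B (the rewrite author's own statement) =====
-- stated objective: alternative
-- what changed: Replaces A's single streaming loop with early break by a tabulate-then-search decomposition: two precomputed parallel tables (block state after each line, cumulative char totals) and a separate scan of those tables for the first cut index, returning lines[:i+1]+['...'] or the whole list.
import Mathlib
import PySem

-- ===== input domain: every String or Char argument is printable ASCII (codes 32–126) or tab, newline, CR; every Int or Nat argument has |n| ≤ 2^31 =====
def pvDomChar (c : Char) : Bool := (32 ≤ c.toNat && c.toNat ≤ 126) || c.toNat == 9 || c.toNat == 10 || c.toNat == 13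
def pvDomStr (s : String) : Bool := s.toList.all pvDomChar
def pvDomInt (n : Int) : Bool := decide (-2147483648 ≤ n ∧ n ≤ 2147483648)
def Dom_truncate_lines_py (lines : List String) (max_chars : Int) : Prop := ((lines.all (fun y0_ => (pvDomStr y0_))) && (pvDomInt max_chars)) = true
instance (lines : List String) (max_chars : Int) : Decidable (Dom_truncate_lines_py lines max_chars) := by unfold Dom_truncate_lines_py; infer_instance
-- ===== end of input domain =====

-- B replaces A's single streaming loop (early break) with precomputed state/total tables plus a separate search for the cut index; same return value, objective: alternative decomposition.
-- ===== PORT A =====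
-- marker test shared by both ports (same substring checks, BEGIN before END)
def pvBlockStep (b : Bool) (ln : String) : Bool :=
  if PySem.Str.isIn "[CODE-BEGIN" ln || PySem.Str.isIn "[MATH-BEGIN" ln then true
  else if PySem.Str.isIn "[CODE-END]" ln || PySem.Str.isIn "[MATH-END]" ln then false
  else b

-- A's loop: state (total, in_block); appends ln, then breaks with "..." when over budget outside a block
def pvTruncA (max_chars : Int) : List String → Int → Bool → List String
  | [], _, _ => []
  | ln :: rest, total, in_block =>
    let ib := pvBlockStep in_block ln
    let total' := total + (PySem.Str.len ln : Int) + 1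
    if total' > max_chars ∧ ib = false then [ln, "..."]
    else ln :: pvTruncA max_chars rest total' ib

def truncate_lines_py (lines : List String) (max_chars : Int) : List String :=
  pvTruncA max_chars lines 0 false

-- ===== PORT B =====
-- pass 1: block state after each line
def pvStates : Bool → List String → List Bool
  | _, [] => []
  | b, ln :: rest => let b' := pvBlockStep b ln; b' :: pvStates b' rest

-- pass 2: cumulative character totals
def pvTotals : Int → List String → List Int
  | _, [] => []
  | t, ln :: rest => let t' := t + (PySem.Str.len ln : Int) + 1; t' :: pvTotals t' rest

-- pass 3: first index over budget and outside a block
def pvFindCut (max_chars : Int) : List (Int × Bool) → Option Nat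
  | [] => none
  | (t, s) :: rest =>
    if t > max_chars ∧ s = false then some 0 else (pvFindCut max_chars rest).map (· + 1)

def truncate_lines_py_alt (lines : List String) (max_chars : Int) : List String :=
  match pvFindCut max_chars ((pvTotals 0 lines).zip (pvStates false lines)) with
  | some i => lines.take (i + 1) ++ ["..."]
  | none => lines

-- ===== PRECONDITION & SPEC =====
def Spec_truncate_lines_py (lines : List String) (max_chars : Int) (out : List String) : Prop := out = truncate_lines_py_alt lines max_chars
instance (lines : List String) (max_chars : Int) (out : List String) : Decidable (Spec_truncate_lines_py lines max_chars out) := by unfold Spec_truncate_lines_py; infer_instance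

-- ===== CLAIM (what is proved, stated in full; the proofs are below) =====
def Claim_equal_truncate_lines_py : Prop := ∀ (lines : List String) (max_chars : Int), Dom_truncate_lines_py lines max_chars → Spec_truncate_lines_py lines max_chars (truncate_lines_py lines max_chars)

-- ===== LEMMAS AND PROOFS =====
-- A's loop from any carried state equals B's table search from the same state
theorem pvTruncA_eq (max_chars : Int) : ∀ (ls : List String) (t : Int) (b : Bool),
    pvTruncA max_chars ls t b =
      match pvFindCut max_chars ((pvTotals t ls).zip (pvStates b ls)) with
      | some i => ls.take (i + 1) ++ ["..."]
      | none => ls := by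
  intro ls
  induction ls with
  | nil => intro t b; simp [pvTruncA, pvTotals, pvStates, pvFindCut]
  | cons ln rest ih =>
    intro t b
    simp only [pvTruncA, pvTotals, pvStates, List.zip_cons_cons, pvFindCut]
    by_cases h : t + (PySem.Str.len ln : Int) + 1 > max_chars ∧ pvBlockStep b ln = false
    · obtain ⟨h1, h2⟩ := h
      simp [h2, show max_chars ≤ t + (ln.length : Int) from by simpa [PySem.Str.len_eq] using h1]
    · simp only [if_neg h, ih]
      cases pvFindCut max_chars ((pvTotals (t + (PySem.Str.len ln : Int) + 1) rest).zip
          (pvStates (pvBlockStep b ln) rest)) with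
      | none => simp
      | some i => simp [List.take_succ_cons]

-- ===== VERDICT (by name: the statement is the Claim_ definition above) =====
theorem truncate_lines_py_spec : Claim_equal_truncate_lines_py := by
  intro lines max_chars _
  unfold Spec_truncate_lines_py truncate_lines_py truncate_lines_py_alt
  exact pvTruncA_eq max_chars lines 0 false
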